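-- pv_equiv track=rewrite | github.com/incerto-crypto/solitude | solitude/client/debug_trace.py | _map_address_to_instruction_number
-- ===== SOURCE A (Python) =====
-- from typing import List, Dict, Tuple, Optional, Iterator, Sequence
--
-- def _map_address_to_instruction_number(bytecode) -> List[int]:
--     out = []
--     # all instructions have length 1, except PUSH1[0x60]..PUSH32[0x7f]
--     # which have length 2..33
--     instr_address = 0
--     k = 0
--     while instr_address < len(bytecode):
--         instr = bytecode[instr_address]
--         instr_length = 1
--         if instr >= 0x60 and instr <= 0x7f:
--             instr_length += instr - 0x5f
--         out.extend([k] * instr_length)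
--         k += 1
--         instr_address += instr_length
--     return out
-- ===== SOURCE B (Python) =====
-- def _map_address_to_instruction_number(bytecode):
--     # Single per-byte pass: iterate over the bytes themselves carrying a
--     # countdown of remaining PUSH-data bytes; a byte is an instruction start
--     # iff the countdown is zero.
--     out = []
--     k = -1
--     skip = 0
--     for b in bytecode:
--         if skip:
--             skip -= 1
--         else:
--             k += 1
--             if 0x60 <= b <= 0x7f:
--                 skip = b - 0x5f
--         out.append(k)
--     # PUSH data claimed past the end of the bytecode still belongs to the
--     # last instruction
--     out.extend([k] * skip)
--     return out
-- ===== Notes on version B (the rewrite author's own statement) =====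
-- stated objective: alternative
-- what changed: Replaces A's instruction-stride while loop (indexed access, advancing by each instruction's length and emitting [k]*length in blocks) with a single fold over the bytes themselves that carries a PUSH-data countdown: each byte emits one index, a byte is a new instruction iff the countdown is zero, and the countdown left over at the end is flushed so the final PUSH's overshoot past the bytecode end is preserved.
import Mathlib
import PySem

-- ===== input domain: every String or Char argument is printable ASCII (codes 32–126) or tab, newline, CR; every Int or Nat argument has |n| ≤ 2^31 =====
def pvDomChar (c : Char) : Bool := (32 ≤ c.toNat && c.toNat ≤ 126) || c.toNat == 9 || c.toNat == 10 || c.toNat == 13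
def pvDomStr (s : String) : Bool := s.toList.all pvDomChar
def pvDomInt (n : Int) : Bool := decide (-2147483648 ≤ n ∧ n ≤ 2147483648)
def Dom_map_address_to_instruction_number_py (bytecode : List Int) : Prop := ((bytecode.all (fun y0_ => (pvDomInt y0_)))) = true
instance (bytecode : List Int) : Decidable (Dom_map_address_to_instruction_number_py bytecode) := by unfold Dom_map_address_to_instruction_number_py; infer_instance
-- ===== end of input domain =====

-- B replaces A's instruction-stride while loop by a single per-byte fold carrying a PUSH-data
-- countdown (flushed at the end); same values, no speed claim.


-- ===== PORT A =====
-- instr_length of A: 1, plus (instr - 0x5f) for PUSH1..PUSH32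
def pvInstrLenA (instr : Int) : Nat :=
  if instr >= 0x60 ∧ instr <= 0x7f then 1 + (instr - 0x5f).toNat else 1

theorem pvInstrLenA_pos (instr : Int) : 1 <= pvInstrLenA instr := by
  unfold pvInstrLenA; split <;> omega

-- the while loop of A: emit [k]*instr_length, advance instr_address, k += 1
def pvGoA (bytecode : List Int) (instr_address : Nat) (k : Int) : List Int :=
  if h : instr_address < bytecode.length then
    List.replicate (pvInstrLenA (bytecode.getD instr_address 0)) k ++
      pvGoA bytecode (instr_address + pvInstrLenA (bytecode.getD instr_address 0)) (k + 1)
  else []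
termination_by bytecode.length - instr_address
decreasing_by have := pvInstrLenA_pos (bytecode.getD instr_address 0); omega

def map_address_to_instruction_number_py (bytecode : List Int) : List Int :=
  pvGoA bytecode 0 0

-- ===== PORT B =====
-- loop body of B: one byte, state (out, k, skip)
def pvStepB (st : List Int × Int × Nat) (b : Int) : List Int × Int × Nat :=
  if st.2.2 ≠ 0 then (st.1 ++ [st.2.1], st.2.1, st.2.2 - 1)
  else
    (st.1 ++ [st.2.1 + 1], st.2.1 + 1,
      if 0x60 <= b ∧ b <= 0x7f then (b - 0x5f).toNat else 0)

def map_address_to_instruction_number_py_alt (bytecode : List Int) : List Int :=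
  let st := bytecode.foldl pvStepB ([], -1, 0)
  -- out.extend([k] * skip)
  st.1 ++ List.replicate st.2.2 st.2.1

-- ===== PRECONDITION & SPEC =====
def Spec_map_address_to_instruction_number_py (bytecode : List Int) (out : List Int) : Prop := out = map_address_to_instruction_number_py_alt bytecode
instance (bytecode : List Int) (out : List Int) : Decidable (Spec_map_address_to_instruction_number_py bytecode out) := by unfold Spec_map_address_to_instruction_number_py; infer_instance

-- ===== CLAIM (what is proved, stated in full; the proofs are below) =====
def Claim_equal_map_address_to_instruction_number_py : Prop := ∀ (bytecode : List Int), Dom_map_address_to_instruction_number_py bytecode → Spec_map_address_to_instruction_number_py bytecode (map_address_to_instruction_number_py bytecode)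

-- ===== LEMMAS AND PROOFS =====

-- ===== VERDICT (by name: the statement is the Claim_ definition above) =====
-- consuming skip over a list that is at most skip long
theorem foldl_stepB_ge (bs : List Int) : ∀ (out : List Int) (k : Int) (skip : Nat),
    bs.length <= skip →
    bs.foldl pvStepB (out, k, skip) = (out ++ List.replicate bs.length k, k, skip - bs.length) := by
  induction bs with
  | nil => intro out k skip _; simp
  | cons b rest ih =>
    intro out k skip h
    simp only [List.length_cons] at h
    have hs : skip ≠ 0 := by omega
    simp only [List.foldl_cons, pvStepB, hs, ne_eq, not_false_eq_true, if_pos]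
    rw [ih (out ++ [k]) k (skip - 1) (by omega)]
    simp [List.replicate_succ, List.append_assoc]
    omega

-- consuming skip over a list that is at least skip long
theorem foldl_stepB_le (skip : Nat) : ∀ (bs out : List Int) (k : Int),
    skip <= bs.length →
    bs.foldl pvStepB (out, k, skip) =
      (bs.drop skip).foldl pvStepB (out ++ List.replicate skip k, k, 0) := by
  induction skip with
  | zero => intro bs out k _; simp
  | succ n ih =>
    intro bs out k h
    cases bs with
    | nil => simp at h
    | cons b rest =>
      simp only [List.foldl_cons, pvStepB]
      have hs : (n + 1 : Nat) ≠ 0 := by omega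
      simp only [hs, ne_eq, not_false_eq_true, if_pos]
      rw [Nat.add_sub_cancel, ih rest (out ++ [k]) k (by simpa using h), List.drop_succ_cons]
      simp [List.replicate_succ, List.append_assoc]

def pvFinishB (st : List Int × Int × Nat) : List Int := st.1 ++ List.replicate st.2.2 st.2.1

theorem pvSkipOf_eq (b : Int) :
    (if 0x60 <= b ∧ b <= 0x7f then (b - 0x5f).toNat else 0) = pvInstrLenA b - 1 := by
  unfold pvInstrLenA; split <;> omega

theorem pvStepB_zero (out : List Int) (k : Int) (b : Int) :
    pvStepB (out, k, 0) b = (out ++ [k + 1], k + 1, pvInstrLenA b - 1) := by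
  simp [pvStepB, pvSkipOf_eq]

theorem main_lemma (bytecode : List Int) : ∀ (addr : Nat) (out : List Int) (k : Int),
    pvFinishB ((bytecode.drop addr).foldl pvStepB (out, k, 0)) =
      out ++ pvGoA bytecode addr (k + 1) := by
  intro addr
  induction hn : bytecode.length - addr using Nat.strong_induction_on generalizing addr with
  | _ n ih =>
  intro out k
  by_cases h : addr < bytecode.length
  · have hdrop : bytecode.drop addr = bytecode[addr] :: bytecode.drop (addr + 1) :=
      List.drop_eq_getElem_cons h
    have hget : bytecode.getD addr 0 = bytecode[addr] := by
      simp [List.getD, List.getElem?_eq_getElem h]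
    set b := bytecode[addr] with hb
    set L := pvInstrLenA b with hL
    have hL1 : 1 <= L := pvInstrLenA_pos b
    rw [hdrop, List.foldl_cons, pvStepB_zero, ← hL]
    by_cases hle : L - 1 <= (bytecode.drop (addr + 1)).length
    · rw [foldl_stepB_le _ _ _ _ hle, List.drop_drop]
      have hdd : addr + 1 + (L - 1) = addr + L := by omega
      rw [hdd]
      have hrec := ih (bytecode.length - (addr + L)) (by omega) (addr + L)
        rfl (out ++ [k + 1] ++ List.replicate (L - 1) (k + 1)) (k + 1)
      rw [hrec]
      have hcomb : (k + 1) :: List.replicate (L - 1) (k + 1) = List.replicate L (k + 1) := by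
        rw [← List.replicate_succ]; congr 1; omega
      conv_rhs => rw [pvGoA]
      rw [dif_pos h, hget, ← hL, ← hcomb]
      simp [List.append_assoc]
    · rw [Nat.not_le] at hle
      rw [foldl_stepB_ge _ _ _ _ (by omega)]
      unfold pvFinishB
      have hlen : (bytecode.drop (addr + 1)).length = bytecode.length - (addr + 1) := by simp
      have hno : ¬ addr + L < bytecode.length := by omega
      rw [pvGoA, dif_pos h, hget, ← hL, pvGoA, dif_neg hno, List.append_nil]
      have hsum : L = 1 + (bytecode.drop (addr + 1)).length +
          (L - 1 - (bytecode.drop (addr + 1)).length) := by omega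
      conv_rhs => rw [hsum]
      rw [List.replicate_add, List.replicate_add]
      simp [List.append_assoc, List.replicate_one]
  · have hnil : bytecode.drop addr = [] := List.drop_eq_nil_of_le (by omega)
    rw [hnil]
    rw [pvGoA]
    simp [pvFinishB, h]

theorem map_address_to_instruction_number_py_spec : Claim_equal_map_address_to_instruction_number_py := by
  intro bytecode _
  unfold Spec_map_address_to_instruction_number_py map_address_to_instruction_number_py
    map_address_to_instruction_number_py_alt
  have := main_lemma bytecode 0 [] (-1)
  simp only [List.drop_zero, pvFinishB] at this
  simp only [show (-1 : Int) + 1 = 0 by norm_num, List.nil_append] at this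
  exact this.symm
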